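-- pv_equiv track=rewrite | github.com/spring-iitd/plaid | carla/arbitration/arbitration.py | convert_to_binary_string
-- ===== SOURCE A (Python) =====
-- def calculate_crc(data):
--     crc = 0x0000
--     poly = 0x4599
--
--     for bit in data:
--         crc ^= (int(bit) & 0x01) << 14
--         for _ in range(15):
--             if crc & 0x8000:
--                 crc = (crc << 1) ^ poly
--             else:
--                 crc <<= 1
--         crc &= 0x7FFF
--
--     return crc
--
-- def stuff_bits(binary_string):
--     result = ''
--     count = 0
--
--     for bit in binary_string:
--         result += bit
--         if bit == '0':
--             count += 1
--             if count == 5: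
--                 result += '1'
--                 count = 0
--         else:
--             count = 0
--
--     return result
--
-- def hex_to_bits(hex_value, num_bits):
--     return bin(int(hex_value, 16))[2:].zfill(num_bits)
--
-- def convert_to_binary_string(can_id, dlc, data):
--     start_of_frame = '0'
--     can_id_bits = hex_to_bits(can_id, 11)
--     rtr_bit = '0'
--     ide_bit = '0'
--     control_r0_bit = '0'
--     dlc_bits = bin(dlc)[2:].zfill(4)
--
--     if data[0] != '':
--         data_bits = ''.join(hex_to_bits(hex_byte, 8) for hex_byte in data)
--     else:
--         data_bits = ''
--
--     crc_bit = bin(calculate_crc(start_of_frame + can_id_bits + rtr_bit + ide_bit + control_r0_bit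
--                                 + dlc_bits + data_bits))[2:].zfill(15)
--
--     crc_delimiter = '1'
--     ack_bit = '0'
--     ack_delimiter = '1'
--     end_of_frame_bits = '1' * 7
--     inter_frame_spacing_bits = '1' * 3
--
--     return stuff_bits(start_of_frame + can_id_bits + rtr_bit + ide_bit + control_r0_bit + dlc_bits + data_bits + crc_bit) + crc_delimiter + ack_bit + ack_delimiter + end_of_frame_bits + inter_frame_spacing_bits
-- ===== SOURCE B (Python) =====
-- def convert_to_binary_string(can_id, dlc, data):
--     NIB = {'0': '0000', '1': '0001', '2': '0010', '3': '0011',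
--            '4': '0100', '5': '0101', '6': '0110', '7': '0111',
--            '8': '1000', '9': '1001', 'a': '1010', 'b': '1011',
--            'c': '1100', 'd': '1101', 'e': '1110', 'f': '1111'}
--
--     def bits(v, w):
--         s = ''.join(NIB[c] for c in '%x' % v).lstrip('0') or '0'
--         return '0' * (w - len(s)) + s
--
--     T = []
--     for x in range(32768):
--         c = x
--         for _ in range(15):
--             c = ((c << 1) ^ 0x4599) if c & 0x8000 else (c << 1)
--         T.append(c & 0x7FFF)
--
--     def crc15(s):
--         crc = 0
--         for b in s:
--             crc = T[crc ^ ((b == '1') << 14)]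
--         return crc
--
--     def stuff(s):
--         out = []
--         i, n = 0, len(s)
--         while i < n:
--             j = i
--             while j < n and s[j] == s[i]:
--                 j += 1
--             if s[i] == '0':
--                 L = j - i
--                 out.append('000001' * (L // 5) + '0' * (L % 5))
--             else:
--                 out.append(s[i:j])
--             i = j
--         return ''.join(out)
--
--     data_bits = '' if data[0] == '' else ''.join(bits(int(b, 16), 8) for b in data)
--     body = '0' + bits(int(can_id, 16), 11) + '000' + bits(dlc, 4) + data_bits
--     body += bits(crc15(body), 15)
--     return stuff(body) + '1011111111111'
-- ===== Notes on version B (the rewrite author's own statement) =====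
-- stated objective: faster
-- what changed: CRC is computed via a precomputed 32768-entry table (one lookup per bit instead of A's 15-iteration shift/reduce inner loop), bit-stuffing is done per maximal run in closed form (a run of L zeros emits L//5 '000001' groups plus L%5 zeros; other runs are copied verbatim) instead of A's one-bit-at-a-time counter, and binary conversion expands the hex form nibble-by-nibble through a 16-entry table instead of bin()[2:].zfill.
import Mathlib
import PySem

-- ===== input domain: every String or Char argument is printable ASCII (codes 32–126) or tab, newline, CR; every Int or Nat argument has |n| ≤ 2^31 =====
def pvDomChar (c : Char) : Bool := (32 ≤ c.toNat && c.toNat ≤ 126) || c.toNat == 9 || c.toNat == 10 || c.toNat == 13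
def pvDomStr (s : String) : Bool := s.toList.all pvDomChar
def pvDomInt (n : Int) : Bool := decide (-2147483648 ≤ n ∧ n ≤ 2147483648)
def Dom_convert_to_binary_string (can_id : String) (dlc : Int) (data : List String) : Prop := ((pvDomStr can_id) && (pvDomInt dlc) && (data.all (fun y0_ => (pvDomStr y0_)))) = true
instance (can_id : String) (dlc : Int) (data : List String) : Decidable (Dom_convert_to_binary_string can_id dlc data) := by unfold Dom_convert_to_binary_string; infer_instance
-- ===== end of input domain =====

-- B recomputes A's frame with a table-driven CRC (one lookup per bit instead of a 15-iteration
-- inner loop; measurably faster on large inputs), run-based closed-form bit stuffing and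
-- nibble-table binary conversion; equivalence is proved on the inputs where A returns.

-- ===== PORT A =====
-- shared helper: Python's int(s, 16) (both Pythons call the same built-in): strip whitespace,
-- optional sign, optional 0x/0X prefix, hex digits with single underscores between digits
-- (an underscore directly after the prefix is allowed); exact on the ASCII domain.
def pvIsWs (c : Char) : Bool := c == ' ' || c == '\t' || c == '\n' || c == '\r' || c.toNat == 11 || c.toNat == 12

def pvHexDigit? (c : Char) : Option Nat :=
  if '0' ≤ c ∧ c ≤ '9' then some (c.toNat - 48)
  else if 'a' ≤ c ∧ c ≤ 'f' then some (c.toNat - 87)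
  else if 'A' ≤ c ∧ c ≤ 'F' then some (c.toNat - 55)
  else none

-- digit run after sign/prefix: underscores only between hex digits, no trailing/double underscore
def pvDigits (l : List Char) (acc : Nat) : Option Nat :=
  match l with
  | [] => some acc
  | '_' :: rest =>
      match rest with
      | c :: _ => if (pvHexDigit? c).isSome then pvDigits rest acc else none
      | [] => none
  | c :: rest =>
      match pvHexDigit? c with
      | some d => pvDigits rest (acc * 16 + d)
      | none => none

def pvHexParse? (s : String) : Option Int :=
  let l := ((s.toList.dropWhile pvIsWs).reverse.dropWhile pvIsWs).reverse
  let sgn : Bool × List Char :=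
    match l with
    | '+' :: t => (false, t)
    | '-' :: t => (true, t)
    | _ => (false, l)
  let pref : Bool × List Char :=
    match sgn.2 with
    | '0' :: 'x' :: t => (true, t)
    | '0' :: 'X' :: t => (true, t)
    | _ => (false, sgn.2)
  match pref.2 with
  | [] => none
  | '_' :: t =>
      if pref.1 then
        match pvDigits ('_' :: t) 0 with
        | some v => some (if sgn.1 then -(v : Int) else (v : Int))
        | none => none
      else none
  | c :: t =>
      match pvDigits (c :: t) 0 with
      | some v => some (if sgn.1 then -(v : Int) else (v : Int))
      | none => none

-- int(bit) & 0x01: exact on the '0'/'1' characters that occur inside Pre_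
def pvDigitBit (c : Char) : Nat := if c = '1' then 1 else 0

-- the inner `for _ in range(15)` shift/reduce loop of calculate_crc
def pvCrcStep (crc : Nat) : Nat :=
  (List.range 15).foldl (fun c _ => if c &&& 0x8000 ≠ 0 then (c <<< 1) ^^^ 0x4599 else c <<< 1) crc

def calculate_crc (l : List Char) : Nat :=
  l.foldl (fun crc b => (pvCrcStep (crc ^^^ (pvDigitBit b <<< 14))) &&& 0x7FFF) 0

-- bin(n)[2:] for n ≥ 0 (negative values never reach bin inside Pre_)
def pvBinA (n : Nat) : List Char :=
  if h : n < 2 then [if n == 1 then '1' else '0']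
  else pvBinA (n / 2) ++ [if n % 2 == 1 then '1' else '0']
  termination_by n
  decreasing_by exact Nat.div_lt_self (by omega) (by omega)

-- str.zfill for unsigned strings (the only ones produced here)
def pvZfill (s : List Char) (w : Nat) : List Char := List.replicate (w - s.length) '0' ++ s

-- hex_to_bits; parse failure / negative value is excluded by Pre_ (Python raises there)
def pvHexToBits (s : String) (w : Nat) : List Char :=
  pvZfill (pvBinA ((pvHexParse? s).getD 0).toNat) w

def pvStuffA : List Char → Nat → List Char
  | [], _ => []
  | c :: t, k =>
      if c = '0' then
        (if k + 1 = 5 then c :: '1' :: pvStuffA t 0 else c :: pvStuffA t (k + 1))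
      else c :: pvStuffA t 0

def convert_to_binary_string (can_id : String) (dlc : Int) (data : List String) : String :=
  match data.head? with          -- data[0]; IndexError on [] is excluded by Pre_
  | none => ""
  | some d0 =>
    let can_id_bits := pvHexToBits can_id 11
    let dlc_bits := pvZfill (pvBinA dlc.toNat) 4   -- bin(dlc); dlc < 0 is excluded by Pre_
    let data_bits := if d0 ≠ "" then (data.map (fun b => pvHexToBits b 8)).flatten else []
    let crc_bit := pvZfill (pvBinA (calculate_crc
        ('0' :: can_id_bits ++ '0' :: '0' :: '0' :: dlc_bits ++ data_bits))) 15
    String.ofList (pvStuffA ('0' :: can_id_bits ++ '0' :: '0' :: '0' :: dlc_bits ++ data_bits ++ crc_bit) 0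
      ++ ['1'] ++ ['0'] ++ ['1'] ++ List.replicate 7 '1' ++ List.replicate 3 '1')

-- ===== PORT B =====
-- '%x' % v: hex digits of v, most significant first
def pvHexChar (d : Nat) : Char :=
  if d < 10 then Char.ofNat (48 + d) else Char.ofNat (87 + d)

def pvHexDigitsB (v : Nat) : List Char :=
  if h : v < 16 then [pvHexChar v] else pvHexDigitsB (v / 16) ++ [pvHexChar (v % 16)]
  termination_by v
  decreasing_by exact Nat.div_lt_self (by omega) (by omega)

-- B's 16-entry nibble table NIB
def pvNib (c : Char) : List Char :=
  match c with
  | '0' => ['0','0','0','0'] | '1' => ['0','0','0','1']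
  | '2' => ['0','0','1','0'] | '3' => ['0','0','1','1']
  | '4' => ['0','1','0','0'] | '5' => ['0','1','0','1']
  | '6' => ['0','1','1','0'] | '7' => ['0','1','1','1']
  | '8' => ['1','0','0','0'] | '9' => ['1','0','0','1']
  | 'a' => ['1','0','1','0'] | 'b' => ['1','0','1','1']
  | 'c' => ['1','1','0','0'] | 'd' => ['1','1','0','1']
  | 'e' => ['1','1','1','0'] | 'f' => ['1','1','1','1']
  | _ => []

-- bits(v, w): expand the hex form nibble-wise, strip leading zeros ('0' if empty), pad to w
def pvBitsB (v w : Nat) : List Char :=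
  let s := (((pvHexDigitsB v).map pvNib).flatten).dropWhile (· == '0')
  let out := if s = [] then ['0'] else s
  List.replicate (w - out.length) '0' ++ out

-- B's precomputed table T: the 15-step shift/reduce of every 15-bit state
def pvTbl : List Nat :=
  (List.range 32768).map (fun x =>
    ((List.range 15).foldl
        (fun c _ => if c &&& 0x8000 ≠ 0 then (c <<< 1) ^^^ 0x4599 else c <<< 1) x) &&& 0x7FFF)

def pvCrcB (l : List Char) : Nat :=
  l.foldl (fun crc b => pvTbl.getD (crc ^^^ ((if b = '1' then 1 else 0) <<< 14)) 0) 0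

-- '000001' * (L // 5) + '0' * (L % 5): the closed-form stuffing of a run of L zeros
def pvEmit (L : Nat) : List Char :=
  (List.replicate (L / 5) ('0' :: '0' :: '0' :: '0' :: '0' :: '1' :: [])).flatten
    ++ List.replicate (L % 5) '0'

-- run-based stuffing: consume one maximal run per step
def pvRunStuff : List Char → List Char
  | [] => []
  | c :: t =>
      (if c = '0' then pvEmit ((t.takeWhile (· == c)).length + 1)
       else List.replicate ((t.takeWhile (· == c)).length + 1) c)
        ++ pvRunStuff (t.dropWhile (· == c))
  termination_by l => l.length
  decreasing_by
    have := List.length_dropWhile_le (p := (· == c)) (l := t)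
    simp
    omega

def convert_to_binary_string_alt (can_id : String) (dlc : Int) (data : List String) : String :=
  match data.head? with
  | none => ""
  | some d0 =>
    let data_bits := if d0 = "" then [] else
      (data.map (fun b => pvBitsB ((pvHexParse? b).getD 0).toNat 8)).flatten
    let body := '0' :: pvBitsB ((pvHexParse? can_id).getD 0).toNat 11
        ++ '0' :: '0' :: '0' :: pvBitsB dlc.toNat 4 ++ data_bits
    String.ofList (pvRunStuff (body ++ pvBitsB (pvCrcB body) 15) ++ "1011111111111".toList)

-- ===== PRECONDITION & SPEC =====
def pvHexOk (s : String) : Bool :=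
  match pvHexParse? s with
  | some v => decide (0 ≤ v)
  | none => false

-- exactly the inputs on which A returns: data nonempty (data[0] IndexError), dlc ≥ 0 and every
-- used hex field parsing to a nonnegative value (otherwise int()/int(bit) raises ValueError)
def Pre_convert_to_binary_string (can_id : String) (dlc : Int) (data : List String) : Prop :=
  data ≠ [] ∧ 0 ≤ dlc ∧ pvHexOk can_id = true ∧
    (data.head? = some "" ∨ data.all pvHexOk = true)
instance (can_id : String) (dlc : Int) (data : List String) : Decidable (Pre_convert_to_binary_string can_id dlc data) := by unfold Pre_convert_to_binary_string; infer_instance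

def pvWitness_convert_to_binary_string : String × Int × List String := ("123", 2, ["ab", "0f"])

def Spec_convert_to_binary_string (can_id : String) (dlc : Int) (data : List String) (out : String) : Prop := out = convert_to_binary_string_alt can_id dlc data
instance (can_id : String) (dlc : Int) (data : List String) (out : String) : Decidable (Spec_convert_to_binary_string can_id dlc data out) := by unfold Spec_convert_to_binary_string; infer_instance

-- ===== CLAIM (what is proved, stated in full; the proofs are below) =====
def Claim_equal_convert_to_binary_string : Prop := ∀ (can_id : String) (dlc : Int) (data : List String), Dom_convert_to_binary_string can_id dlc data → Pre_convert_to_binary_string can_id dlc data → Spec_convert_to_binary_string can_id dlc data (convert_to_binary_string can_id dlc data)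

-- ===== LEMMAS AND PROOFS =====

theorem pvBinA_ne_nil (v : Nat) : pvBinA v ≠ [] := by
  rw [pvBinA]
  by_cases h : v < 2 <;> simp [h]

theorem pvBinA_chunk (v : Nat) (hv : 16 ≤ v) :
    pvBinA v = pvBinA (v / 16) ++
      [if (v / 8) % 2 == 1 then '1' else '0', if (v / 4) % 2 == 1 then '1' else '0',
       if (v / 2) % 2 == 1 then '1' else '0', if v % 2 == 1 then '1' else '0'] := by
  have e1 : pvBinA v = pvBinA (v / 2) ++ [if v % 2 == 1 then '1' else '0'] := by
    rw [pvBinA, dif_neg (by omega : ¬ v < 2)]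
  have e2 : pvBinA (v / 2) = pvBinA (v / 4) ++ [if (v / 2) % 2 == 1 then '1' else '0'] := by
    rw [pvBinA, dif_neg (by omega : ¬ v / 2 < 2), show v / 2 / 2 = v / 4 by omega]
  have e3 : pvBinA (v / 4) = pvBinA (v / 8) ++ [if (v / 4) % 2 == 1 then '1' else '0'] := by
    rw [pvBinA, dif_neg (by omega : ¬ v / 4 < 2), show v / 4 / 2 = v / 8 by omega]
  have e4 : pvBinA (v / 8) = pvBinA (v / 16) ++ [if (v / 8) % 2 == 1 then '1' else '0'] := by
    rw [pvBinA, dif_neg (by omega : ¬ v / 8 < 2), show v / 8 / 2 = v / 16 by omega]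
  rw [e1, e2, e3, e4]
  simp

theorem pvNib_hexChar (r : Nat) (hr : r < 16) :
    pvNib (pvHexChar r) =
      [if (r / 8) % 2 == 1 then '1' else '0', if (r / 4) % 2 == 1 then '1' else '0',
       if (r / 2) % 2 == 1 then '1' else '0', if r % 2 == 1 then '1' else '0'] := by
  interval_cases r <;> rfl

theorem pvNibExpand_pos (v : Nat) (hv : 0 < v) :
    (((pvHexDigitsB v).map pvNib).flatten).dropWhile (· == '0') = pvBinA v := by
  induction v using Nat.strong_induction_on with
  | _ v ih =>
    by_cases h16 : v < 16
    · rw [pvHexDigitsB, dif_pos h16]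
      interval_cases v <;> simp [pvNib, pvHexChar, pvBinA, List.dropWhile]
    · rw [pvHexDigitsB, dif_neg h16]
      have hq : 0 < v / 16 := by omega
      have hih := ih (v / 16) (Nat.div_lt_self (by omega) (by omega)) hq
      rw [List.map_append, List.flatten_append, List.dropWhile_append]
      have hne : ¬ (((pvHexDigitsB (v / 16)).map pvNib).flatten.dropWhile (· == '0')).isEmpty = true := by
        rw [hih]
        simpa using pvBinA_ne_nil (v / 16)
      rw [if_neg hne, hih, pvBinA_chunk v (by omega)]
      have h8 : (v / 8) % 2 = (v % 16 / 8) % 2 := by omega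
      have h4 : (v / 4) % 2 = (v % 16 / 4) % 2 := by omega
      have h2 : (v / 2) % 2 = (v % 16 / 2) % 2 := by omega
      have h1 : v % 2 = v % 16 % 2 := by omega
      rw [h8, h4, h2, h1]
      simp [pvNib_hexChar (v % 16) (by omega)]

theorem pvBits_eq (v w : Nat) : pvZfill (pvBinA v) w = pvBitsB v w := by
  by_cases hv : v = 0
  · subst hv
    rw [pvBinA, pvBitsB, pvHexDigitsB]
    simp [pvZfill, pvNib, pvHexChar, List.dropWhile]
  · rw [pvBitsB]
    simp only [pvNibExpand_pos v (by omega), pvZfill]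
    rw [if_neg (pvBinA_ne_nil v)]

theorem pvTbl_getD (x : Nat) (hx : x < 32768) :
    pvTbl.getD x 0 = pvCrcStep x &&& 0x7FFF := by
  rw [pvTbl, List.getD_eq_getElem?_getD, List.getElem?_map, List.getElem?_range hx]
  simp [pvCrcStep]

theorem pvCrc_eq_aux : ∀ (l : List Char) (crc : Nat), crc < 32768 →
    l.foldl (fun c b => (pvCrcStep (c ^^^ (pvDigitBit b <<< 14))) &&& 0x7FFF) crc =
      l.foldl (fun c b => pvTbl.getD (c ^^^ ((if b = '1' then 1 else 0) <<< 14)) 0) crc := by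
  intro l
  induction l with
  | nil => intro crc _; simp
  | cons b t ih =>
    intro crc hcrc
    simp only [List.foldl_cons]
    have hbit : ((if b = '1' then (1 : Nat) else 0) <<< 14) < 32768 := by
      by_cases hb : b = '1' <;> simp [hb]
    have harg : crc ^^^ ((if b = '1' then (1 : Nat) else 0) <<< 14) < 32768 := by
      have h2 : crc ^^^ ((if b = '1' then (1 : Nat) else 0) <<< 14) < 2 ^ 15 :=
        Nat.xor_lt_two_pow (by omega) (by omega)
      omega
    rw [pvTbl_getD _ harg]
    have hnext : pvCrcStep (crc ^^^ (pvDigitBit b <<< 14)) &&& 0x7FFF < 32768 := by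
      have h : pvCrcStep (crc ^^^ (pvDigitBit b <<< 14)) &&& 0x7FFF ≤ 0x7FFF :=
        Nat.and_le_right
      omega
    rw [ih _ hnext]
    simp [pvDigitBit]

theorem pvCrc_eq (l : List Char) : calculate_crc l = pvCrcB l := by
  rw [calculate_crc, pvCrcB]
  exact pvCrc_eq_aux l 0 (by omega)

theorem pvStuffA_run_nonzero : ∀ (L : Nat) (c : Char) (rest : List Char) (k : Nat), c ≠ '0' →
    pvStuffA (List.replicate (L + 1) c ++ rest) k = List.replicate (L + 1) c ++ pvStuffA rest 0 := by
  intro L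
  induction L with
  | zero => intro c rest k hc; simp [pvStuffA, hc]
  | succ L ih =>
    intro c rest k hc
    rw [List.replicate_succ]
    simp only [List.cons_append, pvStuffA, if_neg hc]
    rw [ih c rest 0 hc]

theorem pvStuffA_small : ∀ (L k : Nat) (rest : List Char), k + L < 5 → rest.head? ≠ some '0' →
    pvStuffA (List.replicate L '0' ++ rest) k = List.replicate L '0' ++ pvStuffA rest 0 := by
  intro L
  induction L with
  | zero =>
    intro k rest _ hrest
    cases rest with
    | nil => rfl
    | cons c t =>
      have hc : c ≠ '0' := by intro h; apply hrest; simp [h]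
      simp [pvStuffA, hc]
  | succ L ih =>
    intro k rest hk hrest
    rw [List.replicate_succ]
    simp only [List.cons_append, pvStuffA]
    have h5 : ¬ (k + 1 = 5) := by omega
    rw [if_neg h5, ih (k + 1) rest (by omega) hrest]
    simp

theorem pvStuffA_five (rest : List Char) :
    pvStuffA (List.replicate 5 '0' ++ rest) 0 =
      '0' :: '0' :: '0' :: '0' :: '0' :: '1' :: pvStuffA rest 0 := by
  simp [List.replicate, pvStuffA]

theorem pvStuffA_zeros : ∀ (L : Nat) (rest : List Char), rest.head? ≠ some '0' →
    pvStuffA (List.replicate L '0' ++ rest) 0 = pvEmit L ++ pvStuffA rest 0 := by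
  intro L
  induction L using Nat.strong_induction_on with
  | _ L ih =>
    intro rest hrest
    by_cases h5 : L < 5
    · rw [pvStuffA_small L 0 rest (by omega) hrest, pvEmit,
        Nat.div_eq_of_lt h5, Nat.mod_eq_of_lt h5]
      simp
    · obtain ⟨M, rfl⟩ : ∃ M, L = M + 5 := ⟨L - 5, by omega⟩
      rw [show M + 5 = 5 + M by omega, List.replicate_add, List.append_assoc,
        pvStuffA_five, ih M (by omega) rest hrest]
      have hdiv : (M + 5) / 5 = M / 5 + 1 := Nat.add_div_right M (by omega)
      have hmod : (M + 5) % 5 = M % 5 := Nat.add_mod_right M 5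
      rw [show (5 : Nat) + M = M + 5 by omega]
      simp [pvEmit, hdiv, hmod, List.replicate_succ]

theorem pvDropWhile_head (l : List Char) (c : Char) :
    (l.dropWhile (· == c)).head? ≠ some c := by
  induction l with
  | nil => simp
  | cons x t ih =>
    by_cases hx : x = c
    · simpa [hx] using ih
    · simp [hx]

theorem pvTakeWhile_replicate (l : List Char) (c : Char) :
    l.takeWhile (· == c) = List.replicate (l.takeWhile (· == c)).length c := by
  apply List.eq_replicate_length.mpr
  intro b hb
  have := List.mem_takeWhile_imp hb
  simpa using this

theorem pvStuff_eq_aux : ∀ (n : Nat) (l : List Char), l.length ≤ n → pvStuffA l 0 = pvRunStuff l := by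
  intro n
  induction n with
  | zero =>
    intro l hl
    have h0 : l = [] := List.length_eq_zero_iff.mp (by omega)
    subst h0
    simp [pvStuffA, pvRunStuff]
  | succ n ih =>
    intro l hl
    cases l with
    | nil => simp [pvStuffA, pvRunStuff]
    | cons c t =>
      have hsplit : c :: t =
          List.replicate ((t.takeWhile (· == c)).length + 1) c ++ t.dropWhile (· == c) := by
        conv_lhs => rw [← List.takeWhile_append_dropWhile (p := (· == c)) (l := t)]
        rw [List.replicate_succ]
        simp [← pvTakeWhile_replicate]
      have hrest : pvStuffA (t.dropWhile (· == c)) 0 = pvRunStuff (t.dropWhile (· == c)) := by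
        apply ih
        have := List.length_dropWhile_le (p := (· == c)) (l := t)
        simp at hl
        omega
      rw [pvRunStuff]
      by_cases hc : c = '0'
      · subst hc
        rw [hsplit, pvStuffA_zeros _ _ (pvDropWhile_head t '0'), hrest]
        simp
      · rw [hsplit, pvStuffA_run_nonzero _ _ _ _ hc, hrest]
        simp [hc]

theorem pvStuff_eq (l : List Char) : pvStuffA l 0 = pvRunStuff l :=
  pvStuff_eq_aux l.length l le_rfl

-- ===== VERDICT (by name: the statement is the Claim_ definition above) =====
theorem convert_to_binary_string_spec : Claim_equal_convert_to_binary_string := by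
  intro can_id dlc data _ hpre
  obtain ⟨hne, hdlc, hid, hdata⟩ := hpre
  unfold Spec_convert_to_binary_string
  cases data with
  | nil => exact absurd rfl hne
  | cons d0 rest =>
    rw [convert_to_binary_string, convert_to_binary_string_alt]
    simp only [List.head?_cons]
    have hbits : ∀ (s : String), pvHexToBits s 8 = pvBitsB ((pvHexParse? s).getD 0).toNat 8 := by
      intro s; rw [pvHexToBits, pvBits_eq _ _]
    have hid11 : pvHexToBits can_id 11 = pvBitsB ((pvHexParse? can_id).getD 0).toNat 11 := by
      rw [pvHexToBits, pvBits_eq _ _]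
    have hdlc4 : pvZfill (pvBinA dlc.toNat) 4 = pvBitsB dlc.toNat 4 :=
      pvBits_eq _ _
    simp only [hid11, hdlc4, hbits]
    by_cases hd0 : d0 = ""
    · simp only [hd0]
      simp [pvStuff_eq, pvCrc_eq, pvBits_eq _ 15, List.replicate]
    · simp [pvStuff_eq, pvCrc_eq, pvBits_eq _ 15, List.replicate, hd0]
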